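-- pv_equiv track=rewrite | github.com/dunnowhattogive/Advent-Of-Code | 2025/Day6/puzzle11.py | find_column_groups
-- ===== SOURCE A (Python) =====
-- def find_column_groups(lines):
-- 	if not lines:
-- 		return []
-- 	width = max(len(ln) for ln in lines)
-- 	grid = [ln.ljust(width) for ln in lines]
-- 	col_has = [any(grid[r][c] != ' ' for r in range(len(grid))) for c in range(width)]
-- 	groups = []
-- 	in_group = False
-- 	start = 0
-- 	for c, has in enumerate(col_has):
-- 		if has and not in_group:
-- 			in_group = True
-- 			start = c
-- 		elif not has and in_group:
-- 			groups.append((start, c - 1))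
-- 			in_group = False
-- 	if in_group:
-- 		groups.append((start, width - 1))
-- 	return grid, groups
-- ===== SOURCE B (Python) =====
-- def find_column_groups(lines):
-- 	width = max(len(ln) for ln in lines)
-- 	grid = [ln.ljust(width) for ln in lines]
-- 	occ = sorted({c for ln in lines for c, ch in enumerate(ln) if ch != ' '})
-- 	groups = []
-- 	if occ:
-- 		start = prev = occ[0]
-- 		for c in occ[1:]:
-- 			if c > prev + 1:
-- 				groups.append((start, prev))
-- 				start = c
-- 			prev = c
-- 		groups.append((start, prev))
-- 	return grid, groups
-- ===== Notes on version B (the rewrite author's own statement) =====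
-- stated objective: alternative
-- what changed: Replaces A's per-column boolean table (a column-major any-over-rows scan plus a state-machine sweep) with one row-major pass collecting the set of occupied column indices, then a gap walk over the sorted indices that emits a range whenever consecutive occupied columns differ by more than 1.
-- outside the precondition, e.g. on find_column_groups([]): A returns (), B raises ValueError
import Mathlib
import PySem

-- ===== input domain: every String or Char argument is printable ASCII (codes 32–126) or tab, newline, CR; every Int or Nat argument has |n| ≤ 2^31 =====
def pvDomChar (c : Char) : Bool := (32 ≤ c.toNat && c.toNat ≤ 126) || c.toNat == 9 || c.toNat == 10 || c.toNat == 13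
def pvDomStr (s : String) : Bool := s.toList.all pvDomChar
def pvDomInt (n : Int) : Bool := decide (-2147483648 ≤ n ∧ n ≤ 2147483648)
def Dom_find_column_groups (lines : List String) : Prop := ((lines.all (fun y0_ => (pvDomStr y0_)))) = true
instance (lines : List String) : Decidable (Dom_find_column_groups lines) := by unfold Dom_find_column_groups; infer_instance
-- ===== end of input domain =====

-- B replaces A's per-column any-over-rows boolean table and state-machine sweep by one
-- row-major pass collecting the set of occupied column indices plus a gap walk over the
-- sorted indices (objective: alternative; equivalence of the RETURN value is proved).

-- ===== PORT A =====
-- str.ljust(w): pad on the right with spaces up to width w (exact; pads with ' ' only).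
def pyLjust (s : String) (w : Int) : List Char :=
  s.toList ++ List.replicate (w - (s.toList.length : Int)).toNat ' '

-- the body of A's 'for c, has in enumerate(col_has)' loop, on state (groups, in_group, start)
def aStep (acc : List (Int × Int) × Bool × Int) (p : Int × Bool) : List (Int × Int) × Bool × Int :=
  if p.2 && !acc.2.1 then (acc.1, true, p.1)
  else if !p.2 && acc.2.1 then (acc.1 ++ [(acc.2.2, p.1 - 1)], false, acc.2.2)
  else acc

def find_column_groups (lines : List String) : List String × (List (Int × Int)) :=
  if lines = [] then ([], [])    -- Python returns the bare list [] here (not a pair); outside Pre_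
  else
    match PySem.List.max? (lines.map fun ln => PySem.Str.len ln) (fun x => x) with
    | none => ([], [])           -- unreachable: lines ≠ []
    | some width =>
      let grid : List (List Char) := lines.map fun ln => pyLjust ln width
      let colHas : List Bool := (PySem.List.pyRange 0 width).map (fun c =>
        (PySem.List.pyRange 0 (grid.length : Int)).any (fun r =>
          decide (PySem.List.pyGetD (PySem.List.pyGetD grid r []) c ' ' ≠ ' ')))
      let st := (PySem.List.enumerate colHas 0).foldl aStep ([], false, 0)
      let groups := if st.2.1 then st.1 ++ [(st.2.2, width - 1)] else st.1
      (grid.map (fun cs => String.ofList cs), groups)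

-- ===== PORT B =====
-- Source B's gap walk over the tail of the sorted occupied columns, state (start, prev)
def bWalk (st prev : Int) : List Int → List (Int × Int)
  | [] => [(st, prev)]
  | c :: cs => if c > prev + 1 then (st, prev) :: bWalk c c cs else bWalk st c cs

def find_column_groups_alt (lines : List String) : List String × (List (Int × Int)) :=
  match PySem.List.max? (lines.map fun ln => PySem.Str.len ln) (fun x => x) with
  | none => ([], [])             -- Source B raises ValueError on []; outside Pre_
  | some width =>
    let grid : List (List Char) := lines.map fun ln => pyLjust ln width
    let occSet : PySem.Set Int := lines.foldl (fun s ln =>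
      (PySem.List.enumerate ln.toList 0).foldl
        (fun s p => if p.2 ≠ ' ' then PySem.Set.add s p.1 else s) s) PySem.Set.empty
    let occ := PySem.List.sorted occSet (fun x => x)
    let groups : List (Int × Int) :=
      match occ with
      | [] => []
      | o :: os => bWalk o o os
    (grid.map (fun cs => String.ofList cs), groups)

-- ===== PRECONDITION & SPEC =====
-- Pre_ excludes only the empty list, on which A returns the bare list [] — not a value of the
-- declared pair type — and B raises ValueError (max of an empty sequence).
def Pre_find_column_groups (lines : List String) : Prop := lines ≠ []
instance (lines : List String) : Decidable (Pre_find_column_groups lines) := by unfold Pre_find_column_groups; infer_instance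
def pvWitness_find_column_groups : List String := [" a  bb", "c"]

def Spec_find_column_groups (lines : List String) (out : List String × (List (Int × Int))) : Prop := out = find_column_groups_alt lines
instance (lines : List String) (out : List String × (List (Int × Int))) : Decidable (Spec_find_column_groups lines out) := by unfold Spec_find_column_groups; infer_instance

-- ===== CLAIM (what is proved, stated in full; the proofs are below) =====
def Claim_equal_find_column_groups : Prop := ∀ (lines : List String), Dom_find_column_groups lines → Pre_find_column_groups lines → Spec_find_column_groups lines (find_column_groups lines)

-- ===== LEMMAS AND PROOFS =====

-- B's groups from the whole sorted occupied list
def pvM : List Int → List (Int × Int)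
  | [] => []
  | o :: os => bWalk o o os

-- A's finishing step after the sweep, with e = width
def pvPost (e : Int) (acc : List (Int × Int) × Bool × Int) : List (Int × Int) :=
  if acc.2.1 then acc.1 ++ [(acc.2.2, e - 1)] else acc.1

-- the occupied columns of [a, b) under the column predicate f, in increasing order
def pvTrues (f : Int → Bool) (a b : Int) : List Int := (PySem.List.pyRange a b).filter f

theorem pv_bWalk_gap (st prev : Int) (l : List Int) (h : ∀ x ∈ l, prev + 1 < x) :
    bWalk st prev l = (st, prev) :: pvM l := by
  cases l with
  | nil => rfl
  | cons c cs =>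
    have hc := h c (by simp)
    simp [bWalk, pvM, hc]

theorem pv_enumerate_map_pyRange (f : Int → Bool) :
    ∀ (n : Nat) (a b : Int), (b - a).toNat = n →
    PySem.List.enumerate ((PySem.List.pyRange a b).map f) a
      = (PySem.List.pyRange a b).map (fun c => (c, f c)) := by
  intro n
  induction n with
  | zero =>
    intro a b hn
    rw [PySem.List.pyRange_one_eq_nil (by omega)]
    simp [PySem.List.enumerate_nil]
  | succ n ih =>
    intro a b hn
    rw [PySem.List.pyRange_one_cons (by omega)]
    simp only [List.map_cons, PySem.List.enumerate_cons]
    rw [ih (a + 1) b (by omega)]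

theorem pv_loop (f : Int → Bool) :
    ∀ (n : Nat) (a b : Int), a ≤ b → (b - a).toNat = n →
    ∀ (gs : List (Int × Int)) (st : Int),
      pvPost b (((PySem.List.pyRange a b).map (fun c => (c, f c))).foldl aStep (gs, false, st))
        = gs ++ pvM (pvTrues f a b)
      ∧ pvPost b (((PySem.List.pyRange a b).map (fun c => (c, f c))).foldl aStep (gs, true, st))
        = gs ++ bWalk st (a - 1) (pvTrues f a b) := by
  intro n
  induction n with
  | zero =>
    intro a b hab hn gs st
    have hba : b = a := by omega
    subst hba
    rw [PySem.List.pyRange_one_eq_nil le_rfl]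
    simp [pvPost, pvM, pvTrues, bWalk, PySem.List.pyRange_one_eq_nil le_rfl]
  | succ n ih =>
    intro a b hab hn gs st
    have hlt : a < b := by omega
    have hrec := ih (a + 1) b (by omega) (by omega)
    rw [pvTrues, PySem.List.pyRange_one_cons hlt]
    simp only [List.map_cons, List.foldl_cons, List.filter_cons]
    cases hfa : f a with
    | false =>
      constructor
      · have : aStep (gs, false, st) (a, false) = (gs, false, st) := by simp [aStep]
        rw [this, (hrec gs st).1]
        simp [pvTrues]
      · have : aStep (gs, true, st) (a, false) = (gs ++ [(st, a - 1)], false, st) := by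
          simp [aStep]
        rw [this, (hrec (gs ++ [(st, a - 1)]) st).1]
        have hgap : bWalk st (a - 1) (pvTrues f (a + 1) b) = (st, a - 1) :: pvM (pvTrues f (a + 1) b) := by
          apply pv_bWalk_gap
          intro x hx
          have : x ∈ PySem.List.pyRange (a+1) b := List.mem_of_mem_filter hx
          have := PySem.List.mem_pyRange_one.mp this
          omega
        simp only [pvTrues] at hgap
        simp [pvTrues, hgap]
    | true =>
      constructor
      · have : aStep (gs, false, st) (a, true) = (gs, true, a) := by simp [aStep]
        rw [this, (hrec gs a).2]
        simp only [pvM]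
        norm_num
        rfl
      · have : aStep (gs, true, st) (a, true) = (gs, true, st) := by simp [aStep]
        rw [this, (hrec gs st).2]
        have : bWalk st (a - 1) (a :: pvTrues f (a+1) b) = bWalk st a (pvTrues f (a+1) b) := by
          simp [bWalk]
        simp only [pvTrues] at this
        simp [pvTrues, this]

theorem pv_mem_inner (ln : List Char) :
    ∀ (s0 : Int) (s : PySem.Set Int) (x : Int),
      (x ∈ (PySem.List.enumerate ln s0).foldl
          (fun s p => if p.2 ≠ ' ' then PySem.Set.add s p.1 else s) s
        ↔ x ∈ s ∨ ∃ k : Nat, ∃ _ : k < ln.length, ln[k] ≠ ' ' ∧ x = s0 + (k : Int)) := by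
  induction ln with
  | nil => intro s0 s x; simp [PySem.List.enumerate_nil]
  | cons c cs ih =>
    intro s0 s x
    rw [PySem.List.enumerate_cons]
    simp only [List.foldl_cons]
    by_cases hc : c ≠ ' '
    · rw [if_pos hc, ih (s0+1) (PySem.Set.add s s0) x]
      rw [PySem.Set.mem_add]
      constructor
      · rintro ((hs | hx) | ⟨k, hk, hne, hx⟩)
        · exact Or.inl hs
        · exact Or.inr ⟨0, by simp, by simpa using hc, by simpa using hx⟩
        · exact Or.inr ⟨k+1, by simpa using hk, by simpa using hne, by push_cast; omega⟩
      · rintro (hs | ⟨k, hk, hne, hx⟩)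
        · exact Or.inl (Or.inl hs)
        · cases k with
          | zero => exact Or.inl (Or.inr (by simpa using hx))
          | succ k => exact Or.inr ⟨k, by simpa using hk, by simpa using hne, by push_cast at hx ⊢; omega⟩
    · rw [if_neg hc, ih (s0+1) s x]
      rw [not_not] at hc
      constructor
      · rintro (hs | ⟨k, hk, hne, hx⟩)
        · exact Or.inl hs
        · exact Or.inr ⟨k+1, by simpa using hk, by simpa using hne, by push_cast; omega⟩
      · rintro (hs | ⟨k, hk, hne, hx⟩)
        · exact Or.inl hs
        · cases k with
          | zero => simp [hc] at hne
          | succ k => exact Or.inr ⟨k, by simpa using hk, by simpa using hne, by push_cast at hx ⊢; omega⟩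

theorem pv_nodup_inner (ln : List Char) :
    ∀ (s0 : Int) (s : PySem.Set Int), s.Nodup →
    ((PySem.List.enumerate ln s0).foldl
      (fun s p => if p.2 ≠ ' ' then PySem.Set.add s p.1 else s) s).Nodup := by
  induction ln with
  | nil => intro s0 s hs; simpa [PySem.List.enumerate_nil] using hs
  | cons c cs ih =>
    intro s0 s hs
    rw [PySem.List.enumerate_cons]
    simp only [List.foldl_cons]
    by_cases hc : c ≠ ' '
    · rw [if_pos hc]; exact ih (s0+1) _ (PySem.Set.nodup_add s s0 hs)
    · rw [if_neg hc]; exact ih (s0+1) s hs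


-- membership in B's occupied-column set
theorem pv_mem_occ (lines : List String) :
    ∀ (s : PySem.Set Int) (x : Int),
      (x ∈ lines.foldl (fun s ln =>
          (PySem.List.enumerate ln.toList 0).foldl
            (fun s p => if p.2 ≠ ' ' then PySem.Set.add s p.1 else s) s) s
        ↔ x ∈ s ∨ ∃ ln ∈ lines, ∃ k : Nat, ∃ _ : k < ln.toList.length,
            ln.toList[k] ≠ ' ' ∧ x = (k : Int)) := by
  induction lines with
  | nil => intro s x; simp
  | cons ln rest ih =>
    intro s x
    simp only [List.foldl_cons]
    rw [ih, pv_mem_inner ln.toList 0 s x]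
    simp only [List.mem_cons]
    constructor
    · rintro ((hs | ⟨k, hk, hne, hx⟩) | ⟨l, hl, k, hk, hne, hx⟩)
      · exact Or.inl hs
      · exact Or.inr ⟨ln, Or.inl rfl, k, hk, hne, by omega⟩
      · exact Or.inr ⟨l, Or.inr hl, k, hk, hne, hx⟩
    · rintro (hs | ⟨l, (rfl | hl), k, hk, hne, hx⟩)
      · exact Or.inl (Or.inl hs)
      · exact Or.inl (Or.inr ⟨k, hk, hne, by omega⟩)
      · exact Or.inr ⟨l, hl, k, hk, hne, hx⟩

theorem pv_nodup_occ (lines : List String) :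
    ∀ (s : PySem.Set Int), s.Nodup →
    (lines.foldl (fun s ln =>
        (PySem.List.enumerate ln.toList 0).foldl
          (fun s p => if p.2 ≠ ' ' then PySem.Set.add s p.1 else s) s) s).Nodup := by
  induction lines with
  | nil => intro s hs; simpa using hs
  | cons ln rest ih =>
    intro s hs
    simp only [List.foldl_cons]
    exact ih _ (pv_nodup_inner ln.toList 0 s hs)

-- the padded grid character test, reduced to the original line
theorem pv_pad_char (ln : List Char) (width c : Int)
    (hlen : (ln.length : Int) ≤ width) (hc0 : 0 ≤ c) (hcw : c < width) :
    (PySem.List.pyGetD (ln ++ List.replicate (width - (ln.length : Int)).toNat ' ') c ' ' ≠ ' ')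
      ↔ ∃ _ : c.toNat < ln.length, ln[c.toNat] ≠ ' ' := by
  rw [PySem.List.pyGetD_of_nonneg _ _ hc0]
  have hrow : (ln ++ List.replicate (width - (ln.length : Int)).toNat ' ').length = width.toNat := by
    simp [List.length_append]; omega
  have hcl : c.toNat < (ln ++ List.replicate (width - (ln.length : Int)).toNat ' ').length := by
    rw [hrow]; omega
  rw [List.getD_eq_getElem _ _ hcl]
  by_cases hk : c.toNat < ln.length
  · rw [List.getElem_append_left hk]
    exact ⟨fun h => ⟨hk, h⟩, fun ⟨_, h⟩ => h⟩
  · rw [List.getElem_append_right (by omega)]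
    simp [List.getElem_replicate, hk]

theorem pv_col_iff (lines : List String) (width : Int)
    (hmax : ∀ ln ∈ lines, (ln.toList.length : Int) ≤ width) (c : Int)
    (hc0 : 0 ≤ c) (hcw : c < width) :
    ((PySem.List.pyRange 0 ((lines.map fun ln => pyLjust ln width).length : Int)).any (fun r =>
        decide (PySem.List.pyGetD (PySem.List.pyGetD (lines.map fun ln => pyLjust ln width) r []) c ' ' ≠ ' ')) = true
      ↔ ∃ ln ∈ lines, ∃ k : Nat, ∃ _ : k < ln.toList.length, ln.toList[k] ≠ ' ' ∧ c = (k : Int)) := by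
  rw [List.any_eq_true]
  constructor
  · rintro ⟨r, hr, hdec⟩
    have hrb := PySem.List.mem_pyRange_one.mp hr
    have hrn : r.toNat < (lines.map fun ln => pyLjust ln width).length := by
      simp at hrb ⊢; omega
    rw [PySem.List.pyGetD_of_nonneg _ _ hrb.1, List.getD_eq_getElem _ _ hrn] at hdec
    have hrn' : r.toNat < lines.length := by simpa using hrn
    rw [List.getElem_map] at hdec
    set ln := lines[r.toNat]
    have hmem : ln ∈ lines := List.getElem_mem hrn'
    rw [pyLjust] at hdec
    have := (pv_pad_char ln.toList width c (hmax ln hmem) hc0 hcw).mp (by simpa using hdec)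
    obtain ⟨hk, hne⟩ := this
    exact ⟨ln, hmem, c.toNat, hk, hne, by omega⟩
  · rintro ⟨ln, hmem, k, hk, hne, rfl⟩
    obtain ⟨i, hi, hgi⟩ := List.mem_iff_getElem.mp hmem
    have key : ∃ _ : k < ln.toList.length, ln.toList[k] ≠ ' ' := ⟨hk, hne⟩
    rw [← hgi] at key
    obtain ⟨hk, hne⟩ := key
    refine ⟨(i : Int), PySem.List.mem_pyRange_one.mpr ⟨by omega, by simp; omega⟩, ?_⟩
    have hin : ((i : Int)).toNat < (lines.map fun ln => pyLjust ln width).length := by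
      simp; omega
    rw [PySem.List.pyGetD_of_nonneg _ _ (by omega : (0:Int) ≤ (i:Int)),
        List.getD_eq_getElem _ _ hin, List.getElem_map, decide_eq_true_iff]
    simp only [Int.toNat_natCast]
    rw [pyLjust]
    have hml : (lines[i].toList.length : Int) ≤ width := hmax _ (List.getElem_mem hi)
    have hkl : (k : Int) < (lines[i].toList.length : Int) := by exact_mod_cast hk
    exact (pv_pad_char lines[i].toList width (k : Int) hml (by omega) (by omega)).mpr
      ⟨by simpa using hk, by simpa using hne⟩

-- B's sorted occupied-column set IS the increasing list of columns satisfying A's column test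
theorem pv_occ_eq (lines : List String) (width : Int) (f : Int → Bool)
    (hf : ∀ c : Int, 0 ≤ c → c < width →
      (f c = true ↔ ∃ ln ∈ lines, ∃ k : Nat, ∃ _ : k < ln.toList.length,
        ln.toList[k] ≠ ' ' ∧ c = (k : Int)))
    (hmax : ∀ ln ∈ lines, (ln.toList.length : Int) ≤ width) :
    PySem.List.sorted (lines.foldl (fun s ln =>
        (PySem.List.enumerate ln.toList 0).foldl
          (fun s p => if p.2 ≠ ' ' then PySem.Set.add s p.1 else s) s) PySem.Set.empty)
      (fun x => x) = pvTrues f 0 width := by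
  apply PySem.List.sorted_eq_of_perm_of_pairwise_lt
  · simp only [pvTrues]
    rw [List.perm_ext_iff_of_nodup ((PySem.List.nodup_pyRange_one 0 width).filter f)
      (pv_nodup_occ lines PySem.Set.empty (by simp [PySem.Set.empty]))]
    intro x
    rw [List.mem_filter, PySem.List.mem_pyRange_one, pv_mem_occ]
    constructor
    · rintro ⟨⟨h0, hw⟩, hfx⟩
      exact Or.inr ((hf x h0 hw).mp hfx)
    · rintro (hs | ⟨ln, hm, k, hk, hne, rfl⟩)
      · simp [PySem.Set.empty] at hs
      · have hkw : ((k : Int)) < width := by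
          have h1 : ((k : Int)) < (ln.toList.length : Int) := by exact_mod_cast hk
          have h2 := hmax ln hm
          omega
        exact ⟨⟨by omega, hkw⟩, (hf _ (by omega) hkw).mpr ⟨ln, hm, k, hk, hne, rfl⟩⟩
  · exact (PySem.List.pairwise_lt_pyRange_one 0 width).filter f

-- ===== VERDICT (by name: the statement is the Claim_ definition above) =====
theorem find_column_groups_spec : Claim_equal_find_column_groups := by
  intro lines hdom hpre
  unfold Spec_find_column_groups
  rw [find_column_groups, find_column_groups_alt, if_neg hpre]
  obtain ⟨width, hw⟩ : ∃ w, PySem.List.max? (lines.map fun ln => PySem.Str.len ln)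
      (fun x => x) = some w := by
    cases h : PySem.List.max? (lines.map fun ln => PySem.Str.len ln) (fun x => x) with
    | none =>
      have := (PySem.List.max?_eq_none_iff _ _).mp h
      simp at this
      exact absurd this hpre
    | some w => exact ⟨w, rfl⟩
  rw [hw]
  dsimp only
  have hmax : ∀ ln ∈ lines, (ln.toList.length : Int) ≤ width := by
    intro ln h
    have := PySem.List.max?_isMax hw (PySem.Str.len ln) (List.mem_map_of_mem h)
    simpa [PySem.Str.len_eq] using this
  have h0w : (0 : Int) ≤ width := by
    have := PySem.List.max?_mem hw
    obtain ⟨ln, -, rfl⟩ := List.mem_map.mp this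
    simp [PySem.Str.len_eq]
  refine congrArg (Prod.mk _) ?_
  rw [pv_occ_eq lines width _ (fun c hc0 hcw => pv_col_iff lines width hmax c hc0 hcw) hmax]
  rw [pv_enumerate_map_pyRange _ width.toNat 0 width (by omega)]
  have hloop := (pv_loop (fun c =>
      (PySem.List.pyRange 0 (((lines.map fun ln => pyLjust ln width).length : Nat) : Int)).any
        (fun r => decide (PySem.List.pyGetD (PySem.List.pyGetD
          (lines.map fun ln => pyLjust ln width) r []) c ' ' ≠ ' ')))
    width.toNat 0 width h0w (by omega) [] 0).1
  rw [List.nil_append] at hloop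
  refine Eq.trans hloop ?_
  generalize pvTrues (fun c =>
      (PySem.List.pyRange 0 (((lines.map fun ln => pyLjust ln width).length : Nat) : Int)).any
        (fun r => decide (PySem.List.pyGetD (PySem.List.pyGetD
          (lines.map fun ln => pyLjust ln width) r []) c ' ' ≠ ' '))) 0 width = T
  cases T <;> rfl
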